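-- pv_equiv track=rewrite | github.com/None9527/NGOAgent | agent-search/search/cleaner.py | _remove_short_line_blocks
-- ===== SOURCE A (Python) =====
-- def _remove_short_line_blocks(text: str, threshold: int = 5, max_chars: int = 50) -> str:
--     """
--     Detect and remove contiguous blocks of short lines (navigation menu pattern).
--
--     A block of 5+ consecutive lines where each line has < 50 chars
--     is likely a navigation menu, breadcrumb trail, or tag cloud.
--     """
--     lines = text.split('\n')
--     result: list[str] = []
--     block: list[str] = []
--
--     for line in lines:
--         stripped = line.strip()
--         if 0 < len(stripped) < max_chars:
--             block.append(line)
--         else: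
--             if len(block) < threshold:
--                 result.extend(block)
--             block = []
--             result.append(line)
--
--     if len(block) < threshold:
--         result.extend(block)
--
--     return '\n'.join(result)
-- ===== SOURCE B (Python) =====
-- def _remove_short_line_blocks(text: str, threshold: int = 5, max_chars: int = 50) -> str:
--     """Group the lines into maximal runs of same-kind (short / non-short) lines,
--     then keep every non-short run and every short run of length < threshold."""
--
--     def is_short(line):
--         return 0 < len(line.strip()) < max_chars
--
--     runs = []  # list of (is_short_key, [lines...]) maximal runs, in order
--     for line in text.split('\n'):
--         k = is_short(line)
--         if runs and runs[-1][0] == k: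
--             runs[-1][1].append(line)
--         else:
--             runs.append((k, [line]))
--
--     kept = []
--     for k, grp in runs:
--         if not k or len(grp) < threshold:
--             kept.extend(grp)
--     return '\n'.join(kept)
-- ===== Notes on version B (the rewrite author's own statement) =====
-- stated objective: alternative
-- what changed: Replaces A's incremental accumulate-then-flush loop over lines by a two-phase decomposition: first group the lines into maximal runs of same kind (short vs non-short), then keep each non-short run and each short run of length < threshold, and join.
import Mathlib
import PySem

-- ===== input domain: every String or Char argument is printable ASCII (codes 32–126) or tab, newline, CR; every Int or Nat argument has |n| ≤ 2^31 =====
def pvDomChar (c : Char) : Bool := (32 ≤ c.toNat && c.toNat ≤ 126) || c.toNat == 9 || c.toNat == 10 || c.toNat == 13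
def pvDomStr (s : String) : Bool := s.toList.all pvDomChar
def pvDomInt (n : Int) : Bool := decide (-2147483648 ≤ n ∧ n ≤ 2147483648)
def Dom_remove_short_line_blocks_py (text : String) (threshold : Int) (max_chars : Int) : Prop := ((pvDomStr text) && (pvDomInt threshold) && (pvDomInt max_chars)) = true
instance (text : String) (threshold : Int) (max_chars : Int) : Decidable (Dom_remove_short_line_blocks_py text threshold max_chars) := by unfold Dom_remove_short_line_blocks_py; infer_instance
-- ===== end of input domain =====

-- B replaces A's accumulate-then-flush loop by a grouping pass into maximal
-- same-kind runs plus a per-run keep/drop decision (objective: alternative decomposition).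

-- ===== PORT A =====
-- the body of A's for-loop, as a helper; state = (result, block)
def pvStepA (threshold max_chars : Int) (st : List String × List String) (line : String) :
    List String × List String :=
  let stripped := PySem.Str.strip line
  if 0 < PySem.Str.len stripped ∧ PySem.Str.len stripped < max_chars then
    (st.1, st.2 ++ [line])
  else
    if (st.2.length : Int) < threshold then (st.1 ++ st.2 ++ [line], [])
    else (st.1 ++ [line], [])

def remove_short_line_blocks_py (text : String) (threshold : Int) (max_chars : Int) : String :=
  -- text.split('\n'): the separator is the non-empty literal "\n", so split? is always some
  let lines := (PySem.Str.split? text "\n").getD []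
  let st := lines.foldl (pvStepA threshold max_chars) ([], [])
  let result := if (st.2.length : Int) < threshold then st.1 ++ st.2 else st.1
  PySem.Str.join "\n" result

-- ===== PORT B =====
def pvIsShort (max_chars : Int) (line : String) : Bool :=
  decide (0 < PySem.Str.len (PySem.Str.strip line) ∧
          PySem.Str.len (PySem.Str.strip line) < max_chars)

-- append a line to the run list: merge into the last run if its key matches
def pvAddRun (runs : List (Bool × List String)) (k : Bool) (line : String) :
    List (Bool × List String) :=
  match runs.getLast? with
  | some r => if r.1 == k then runs.dropLast ++ [(r.1, r.2 ++ [line])]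
              else runs ++ [(k, [line])]
  | none => runs ++ [(k, [line])]

def remove_short_line_blocks_py_alt (text : String) (threshold : Int) (max_chars : Int) : String :=
  -- text.split('\n') as in A's port: split? is always some for the non-empty "\n"
  let lines := (PySem.Str.split? text "\n").getD []
  let runs := lines.foldl (fun runs line => pvAddRun runs (pvIsShort max_chars line) line) []
  let kept := runs.foldl
    (fun acc r => if !r.1 || (r.2.length : Int) < threshold then acc ++ r.2 else acc) []
  PySem.Str.join "\n" kept

-- ===== PRECONDITION & SPEC =====
def Spec_remove_short_line_blocks_py (text : String) (threshold : Int) (max_chars : Int) (out : String) : Prop := out = remove_short_line_blocks_py_alt text threshold max_chars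
instance (text : String) (threshold : Int) (max_chars : Int) (out : String) : Decidable (Spec_remove_short_line_blocks_py text threshold max_chars out) := by unfold Spec_remove_short_line_blocks_py; infer_instance

-- ===== CLAIM (what is proved, stated in full; the proofs are below) =====
def Claim_equal_remove_short_line_blocks_py : Prop := ∀ (text : String) (threshold : Int) (max_chars : Int), Dom_remove_short_line_blocks_py text threshold max_chars → Spec_remove_short_line_blocks_py text threshold max_chars (remove_short_line_blocks_py text threshold max_chars)

-- ===== LEMMAS AND PROOFS =====

-- what B keeps from one run
def pvKeepOne (threshold : Int) (r : Bool × List String) : List String :=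
  if !r.1 || (r.2.length : Int) < threshold then r.2 else []

theorem pvKeep_fold (threshold : Int) (runs : List (Bool × List String)) :
    ∀ acc : List String,
      runs.foldl (fun acc r => if !r.1 || (r.2.length : Int) < threshold then acc ++ r.2 else acc) acc
        = acc ++ runs.flatMap (pvKeepOne threshold) := by
  induction runs with
  | nil => simp
  | cons r rs ih =>
      intro acc
      simp only [List.foldl_cons, List.flatMap_cons, ih, pvKeepOne]
      split <;> simp

theorem pvAddRun_nil (k : Bool) (l : String) : pvAddRun [] k l = [(k, [l])] := rfl

theorem pvAddRun_concat (R : List (Bool × List String)) (k' k : Bool) (g : List String)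
    (l : String) :
    pvAddRun (R ++ [(k', g)]) k l =
      if k' = k then R ++ [(k', g ++ [l])] else R ++ [(k', g)] ++ [(k, [l])] := by
  simp [pvAddRun]

theorem pvStepA_short (threshold max_chars : Int) (st : List String × List String) (l : String)
    (hp : 0 < PySem.Str.len (PySem.Str.strip l) ∧ PySem.Str.len (PySem.Str.strip l) < max_chars) :
    pvStepA threshold max_chars st l = (st.1, st.2 ++ [l]) := by
  simp only [pvStepA]; rw [if_pos hp]

theorem pvStepA_long (threshold max_chars : Int) (st : List String × List String) (l : String)
    (hp : ¬ (0 < PySem.Str.len (PySem.Str.strip l) ∧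
             PySem.Str.len (PySem.Str.strip l) < max_chars)) :
    pvStepA threshold max_chars st l =
      if (st.2.length : Int) < threshold then (st.1 ++ st.2 ++ [l], []) else (st.1 ++ [l], []) := by
  simp only [pvStepA]; rw [if_neg hp]

-- A's post-loop flush
def pvFinalA (threshold : Int) (st : List String × List String) : List String :=
  if (st.2.length : Int) < threshold then st.1 ++ st.2 else st.1

-- invariant relating A's (result, block) state to B's run list
def pvInv (threshold : Int) (result block : List String)
    (runs : List (Bool × List String)) : Prop :=
  (block = [] ∧ runs.flatMap (pvKeepOne threshold) = result ∧
     (runs = [] ∨ ∃ R g, runs = R ++ [(false, g)]))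
  ∨ (∃ R, runs = R ++ [(true, block)] ∧ block ≠ [] ∧
       R.flatMap (pvKeepOne threshold) = result)

theorem pvMain (threshold max_chars : Int) :
    ∀ (ls : List String) (result block : List String)
      (runs : List (Bool × List String)),
      pvInv threshold result block runs →
      pvFinalA threshold (ls.foldl (pvStepA threshold max_chars) (result, block))
        = (ls.foldl (fun runs line => pvAddRun runs (pvIsShort max_chars line) line) runs).flatMap
            (pvKeepOne threshold) := by
  intro ls
  induction ls with
  | nil =>
      intro result block runs hinv
      rcases hinv with ⟨hb, hr, _⟩ | ⟨R, hruns, _, hR⟩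
      · subst hb; simp [pvFinalA, hr]
      · subst hruns
        simp only [List.foldl_nil, pvFinalA, List.flatMap_append,
          List.flatMap_cons, List.flatMap_nil, List.append_nil, pvKeepOne, hR,
          Bool.not_true, Bool.false_or]
        by_cases hlen : (block.length : Int) < threshold <;> simp [hlen]
  | cons l ls ih =>
      intro result block runs hinv
      simp only [List.foldl_cons]
      by_cases hp : 0 < PySem.Str.len (PySem.Str.strip l) ∧
          PySem.Str.len (PySem.Str.strip l) < max_chars
      · -- l is short
        have hk : pvIsShort max_chars l = true := decide_eq_true hp
        rw [hk, pvStepA_short threshold max_chars (result, block) l hp]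
        rcases hinv with ⟨hb, hr, hlast⟩ | ⟨R, hruns, hbne, hR⟩
        · subst hb
          rcases hlast with hnil | ⟨R, g, hr'⟩
          · subst hnil
            rw [pvAddRun_nil]
            exact ih result [l] [(true, [l])] (Or.inr ⟨[], rfl, by simp, by simpa using hr⟩)
          · subst hr'
            rw [pvAddRun_concat, if_neg (by decide : ¬((false : Bool) = true))]
            exact ih result [l] _ (Or.inr ⟨R ++ [(false, g)], rfl, by simp, hr⟩)
        · subst hruns
          rw [pvAddRun_concat, if_pos rfl]
          exact ih result (block ++ [l]) _ (Or.inr ⟨R, rfl, by simp, hR⟩)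
      · -- l is not short
        have hk : pvIsShort max_chars l = false := decide_eq_false hp
        rw [hk, pvStepA_long threshold max_chars (result, block) l hp]
        rcases hinv with ⟨hb, hr, hlast⟩ | ⟨R, hruns, hbne, hR⟩
        · subst hb
          rw [show (if (([] : List String).length : Int) < threshold
                then (result ++ [] ++ [l], ([] : List String)) else (result ++ [l], []))
              = (result ++ [l], []) by split <;> simp]
          rcases hlast with hnil | ⟨R, g, hr'⟩
          · subst hnil
            rw [pvAddRun_nil]
            refine ih (result ++ [l]) [] [(false, [l])]
              (Or.inl ⟨rfl, ?_, Or.inr ⟨[], [l], rfl⟩⟩)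
            simp only [List.flatMap_nil] at hr
            simp [pvKeepOne, ← hr]
          · subst hr'
            rw [pvAddRun_concat, if_pos rfl]
            refine ih (result ++ [l]) [] (R ++ [(false, g ++ [l])])
              (Or.inl ⟨rfl, ?_, Or.inr ⟨R, g ++ [l], rfl⟩⟩)
            simp only [List.flatMap_append, List.flatMap_cons, List.flatMap_nil,
              List.append_nil, pvKeepOne, Bool.not_false, Bool.true_or, if_true] at hr ⊢
            rw [← hr]; simp
        · subst hruns
          rw [pvAddRun_concat, if_neg (by decide : ¬((true : Bool) = false))]
          by_cases hlen : (block.length : Int) < threshold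
          · rw [if_pos hlen]
            refine ih (result ++ block ++ [l]) [] _
              (Or.inl ⟨rfl, ?_, Or.inr ⟨R ++ [(true, block)], [l], by simp⟩⟩)
            simp only [List.append_assoc, List.flatMap_append, List.flatMap_cons,
              List.flatMap_nil, List.append_nil, pvKeepOne, hR,
              Bool.not_true, Bool.false_or, Bool.not_false, Bool.true_or, if_true]
            simp [hlen]
          · rw [if_neg hlen]
            refine ih (result ++ [l]) [] _
              (Or.inl ⟨rfl, ?_, Or.inr ⟨R ++ [(true, block)], [l], by simp⟩⟩)
            simp only [List.append_assoc, List.flatMap_append, List.flatMap_cons,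
              List.flatMap_nil, List.append_nil, pvKeepOne, hR,
              Bool.not_true, Bool.false_or, Bool.not_false, Bool.true_or, if_true]
            simp [hlen]

-- ===== VERDICT (by name: the statement is the Claim_ definition above) =====
theorem remove_short_line_blocks_py_spec : Claim_equal_remove_short_line_blocks_py := by
  intro text threshold max_chars _
  unfold Spec_remove_short_line_blocks_py
  simp only [remove_short_line_blocks_py, remove_short_line_blocks_py_alt]
  rw [pvKeep_fold]
  simp only [List.nil_append]
  congr 1
  exact pvMain threshold max_chars ((PySem.Str.split? text "\n").getD []) [] [] []
    (Or.inl ⟨rfl, by simp, Or.inl rfl⟩)
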